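-- pv_equiv track=rewrite | github.com/longint1024/Python-Learning | Codes/Daily-Practice/t1627.py | areConnected
-- ===== SOURCE A (Python) =====
-- from typing import List
--
-- class UnionFind:
--     def __init__(self, n: int):
--         self.parent = list(range(n))
--         self.size = [1] * n
--         self.n = n
--         # 当前连通分量数目
--         self.setCount = n
--
--     def findset(self, x: int) -> int:
--         if self.parent[x] == x:
--             return x
--         self.parent[x] = self.findset(self.parent[x])
--         return self.parent[x]
--
--     def unite(self, x: int, y: int) -> bool:
--         x, y = self.findset(x), self.findset(y)
--         if x == y:
--             return False
--         if self.size[x] < self.size[y]: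
--             x, y = y, x
--         self.parent[y] = x
--         self.size[x] += self.size[y]
--         self.setCount -= 1
--         return True
--
--     def connected(self, x: int, y: int) -> bool:
--         x, y = self.findset(x), self.findset(y)
--         return x == y
--
-- def areConnected(n: int, threshold: int, queries: List[List[int]]) -> List[bool]:
--     uf = UnionFind(n)
--     visited = [0 for _ in range(n+1)]
--     for i in range(threshold+1, n+1):
--         if not visited[i]:
--             for k in range(2,n//i+1):
--                 uf.unite(i-1,i*k-1)
--                 visited[i*k] = 1
--     ans = []
--     for q in queries:
--         ans.append(uf.connected(q[0]-1,q[1]-1))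
--     return ans
-- ===== SOURCE B (Python) =====
-- from typing import List
--
-- def areConnected(n: int, threshold: int, queries: List[List[int]]) -> List[bool]:
--     # Component labels maintained by whole-array relabelling instead of union-find.
--     label = list(range(n))
--     visited = [0] * (n + 1)
--     for i in range(threshold + 1, n + 1):
--         if not visited[i]:
--             for k in range(2, n // i + 1):
--                 a, b = label[i - 1], label[i * k - 1]
--                 if a != b:
--                     label = [a if v == b else v for v in label]
--                 visited[i * k] = 1
--     return [label[q[0] - 1] == label[q[1] - 1] for q in queries]
-- ===== Notes on version B (the rewrite author's own statement) =====
-- stated objective: simpler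
-- what changed: Replaces the UnionFind class (recursive find with path compression, union by size) with a flat label array merged by whole-array relabelling, answering queries by label equality.
import Mathlib
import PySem

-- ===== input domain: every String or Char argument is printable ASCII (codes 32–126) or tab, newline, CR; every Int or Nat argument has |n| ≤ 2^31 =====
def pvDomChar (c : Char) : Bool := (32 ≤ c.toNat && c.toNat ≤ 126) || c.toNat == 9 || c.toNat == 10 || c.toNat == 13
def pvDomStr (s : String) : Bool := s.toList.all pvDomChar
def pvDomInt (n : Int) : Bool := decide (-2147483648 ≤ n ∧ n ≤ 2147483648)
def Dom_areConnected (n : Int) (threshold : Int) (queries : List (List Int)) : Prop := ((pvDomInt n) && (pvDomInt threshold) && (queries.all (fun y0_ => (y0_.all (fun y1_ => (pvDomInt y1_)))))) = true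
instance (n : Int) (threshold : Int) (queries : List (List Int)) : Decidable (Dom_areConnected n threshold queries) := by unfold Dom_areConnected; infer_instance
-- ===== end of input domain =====

-- B replaces A's union-find (recursive path compression + union by size) by a flat component-label
-- array merged by whole-array relabelling; same results, a plainer structure (not claimed faster).


-- ===== PORT A =====
-- UnionFind.findset with path compression; the Nat argument is a fuel bound for the Python
-- recursion (call sites pass the list length, enough under Pre_); the `none`/fuel-0 defaults
-- are unreachable under Pre_.
def findset (parent : List Int) (x : Int) : Nat → List Int × Int
  | 0 => (parent, x)
  | fuel+1 =>
    match PySem.List.pyGet? parent x with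
    | none => (parent, x)
    | some p =>
      if p = x then (parent, x)
      else
        let r := findset parent p fuel
        (PySem.List.pySetD r.1 x r.2, r.2)

-- UnionFind.unite (mutating parent/size, returned as a pair here)
def unite (parent : List Int) (size : List Int) (x y : Int) : List Int × List Int :=
  let fx := findset parent x parent.length
  let fy := findset fx.1 y fx.1.length
  if fx.2 = fy.2 then (fy.1, size)
  else
    let sx := (PySem.List.pyGet? size fx.2).getD 0
    let sy := (PySem.List.pyGet? size fy.2).getD 0
    let p := if sx < sy then (fy.2, fx.2) else (fx.2, fy.2)
    (PySem.List.pySetD fy.1 p.2 p.1,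
     PySem.List.pySetD size p.1 ((PySem.List.pyGet? size p.1).getD 0 + (PySem.List.pyGet? size p.2).getD 0))

-- UnionFind.connected
def connectedA (parent : List Int) (x y : Int) : List Int × Bool :=
  let fx := findset parent x parent.length
  let fy := findset fx.1 y fx.1.length
  (fy.1, decide (fx.2 = fy.2))

def areConnected (n : Int) (threshold : Int) (queries : List (List Int)) : List Bool :=
  let parent0 := PySem.List.pyRange 0 n 1
  let size0 := PySem.List.pyRepeat [(1 : Int)] n
  let visited0 := PySem.List.pyRepeat [(0 : Int)] (n+1)
  let st := (PySem.List.pyRange (threshold+1) (n+1) 1).foldl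
    (fun (st : List Int × List Int × List Int) i =>
      if (PySem.List.pyGet? st.2.2 i).getD 0 = 0 then
        (PySem.List.pyRange 2 (PySem.Int.floordiv n i + 1) 1).foldl
          (fun (st2 : List Int × List Int × List Int) k =>
            let u := unite st2.1 st2.2.1 (i-1) (i*k-1)
            (u.1, u.2, PySem.List.pySetD st2.2.2 (i*k) 1)) st
      else st)
    (parent0, size0, visited0)
  (queries.foldl (fun (acc : List Int × List Bool) q =>
      let c := connectedA acc.1 ((PySem.List.pyGet? q 0).getD 0 - 1) ((PySem.List.pyGet? q 1).getD 0 - 1)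
      (c.1, acc.2 ++ [c.2])) (st.1, [])).2

-- ===== PORT B =====
def areConnected_alt (n : Int) (threshold : Int) (queries : List (List Int)) : List Bool :=
  let label0 := PySem.List.pyRange 0 n 1
  let visited0 := PySem.List.pyRepeat [(0 : Int)] (n+1)
  let st := (PySem.List.pyRange (threshold+1) (n+1) 1).foldl
    (fun (st : List Int × List Int) i =>
      if (PySem.List.pyGet? st.2 i).getD 0 = 0 then
        (PySem.List.pyRange 2 (PySem.Int.floordiv n i + 1) 1).foldl
          (fun (st2 : List Int × List Int) k =>
            let a := (PySem.List.pyGet? st2.1 (i-1)).getD 0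
            let b := (PySem.List.pyGet? st2.1 (i*k-1)).getD 0
            ((if a ≠ b then st2.1.map (fun v => if v = b then a else v) else st2.1),
             PySem.List.pySetD st2.2 (i*k) 1)) st
      else st)
    (label0, visited0)
  queries.map (fun q =>
    decide ((PySem.List.pyGet? st.1 ((PySem.List.pyGet? q 0).getD 0 - 1)).getD 0
          = (PySem.List.pyGet? st.1 ((PySem.List.pyGet? q 1).getD 0 - 1)).getD 0))

-- ===== PRECONDITION & SPEC =====
-- Pre_ excludes exactly the inputs where the Python A raises (B raises there too):
-- a negative threshold with threshold < n makes A's merge loop hit i ≤ 0 (ZeroDivisionError /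
-- IndexError), and a query shorter than 2 or with an entry outside [1-n, n] raises IndexError.
def Pre_areConnected (n : Int) (threshold : Int) (queries : List (List Int)) : Prop :=
  (0 ≤ threshold ∨ n ≤ threshold) ∧
  ∀ q ∈ queries, 2 ≤ q.length ∧
    1 - n ≤ q.getD 0 0 ∧ q.getD 0 0 ≤ n ∧ 1 - n ≤ q.getD 1 0 ∧ q.getD 1 0 ≤ n
instance (n : Int) (threshold : Int) (queries : List (List Int)) : Decidable (Pre_areConnected n threshold queries) := by unfold Pre_areConnected; infer_instance

def pvWitness_areConnected : Int × Int × List (List Int) := (6, 2, [[1,4],[2,5],[3,6]])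

def Spec_areConnected (n : Int) (threshold : Int) (queries : List (List Int)) (out : List Bool) : Prop := out = areConnected_alt n threshold queries
instance (n : Int) (threshold : Int) (queries : List (List Int)) (out : List Bool) : Decidable (Spec_areConnected n threshold queries out) := by unfold Spec_areConnected; infer_instance

-- ===== CLAIM (what is proved, stated in full; the proofs are below) =====
def Claim_equal_areConnected : Prop := ∀ (n : Int) (threshold : Int) (queries : List (List Int)), Dom_areConnected n threshold queries → Pre_areConnected n threshold queries → Spec_areConnected n threshold queries (areConnected n threshold queries)

-- ===== LEMMAS AND PROOFS =====

def pvPar (P : List Int) (j : Nat) : Nat := (P.getD j 0).toNat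
def pvRoot (P : List Int) (j : Nat) : Nat := (pvPar P)^[P.length] j
def pvWF (P : List Int) (d : Nat → Nat) : Prop :=
  (∀ j, j < P.length → 0 ≤ P.getD j 0 ∧ pvPar P j < P.length) ∧
  (∀ j, j < P.length → pvPar P j ≠ j → d (pvPar P j) < d j)

-- iterates stay below N
theorem pvIterLt (f : Nat → Nat) (N : Nat) (hr : ∀ j, j < N → f j < N)
    (j : Nat) (hj : j < N) : ∀ m, f^[m] j < N := by
  intro m
  induction m with
  | zero => simpa
  | succ m ih => rw [Function.iterate_succ_apply']; exact hr _ ih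

theorem pvFixReach (f : Nat → Nat) (N : Nat) (d : Nat → Nat)
    (hr : ∀ j, j < N → f j < N) (hd : ∀ j, j < N → f j ≠ j → d (f j) < d j)
    (j : Nat) (hj : j < N) : ∃ m, m < N ∧ f (f^[m] j) = f^[m] j := by
  by_contra h
  push_neg at h
  have hlt : ∀ m, f^[m] j < N := pvIterLt f N hr j hj
  have hdec : ∀ m, m < N → d (f^[m+1] j) < d (f^[m] j) := by
    intro m hm
    rw [Function.iterate_succ_apply']
    exact hd _ (hlt m) (h m hm)
  have hmono : ∀ m2 m1, m1 < m2 → m2 ≤ N → d (f^[m2] j) < d (f^[m1] j) := by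
    intro m2
    induction m2 with
    | zero => omega
    | succ m2 ih =>
      intro m1 h1 h2
      rcases Nat.lt_or_ge m1 m2 with h3 | h3
      · exact lt_trans (hdec m2 (by omega)) (ih m1 h3 (by omega))
      · have : m1 = m2 := by omega
        subst this
        exact hdec m1 (by omega)
  have hinj : Function.Injective (fun m : Fin (N+1) => (⟨f^[m.1] j, hlt m.1⟩ : Fin N)) := by
    intro m1 m2 heq
    simp only [Fin.mk.injEq] at heq
    have hb1 := Nat.lt_succ_iff.mp m1.isLt
    have hb2 := Nat.lt_succ_iff.mp m2.isLt
    rcases lt_trichotomy m1.1 m2.1 with h | h | h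
    · have := hmono m2.1 m1.1 h hb2; rw [heq] at this; omega
    · exact Fin.ext h
    · have := hmono m1.1 m2.1 h hb1; rw [heq] at this; omega
  have := Fintype.card_le_of_injective _ hinj
  simp at this

theorem pvFixStable (f : Nat → Nat) (m m' j : Nat) (hfix : f (f^[m] j) = f^[m] j)
    (h : m ≤ m') : f^[m'] j = f^[m] j := by
  induction m' with
  | zero => have : m = 0 := by omega
            subst this; rfl
  | succ m' ih =>
    rcases Nat.lt_or_ge m m'.succ with h1 | h1
    · have := ih (by omega)
      rw [Function.iterate_succ_apply', this, hfix]
    · have : m = m' + 1 := by omega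
      subst this; rfl

theorem pvRootFixF (f : Nat → Nat) (N : Nat) (d : Nat → Nat)
    (hr : ∀ j, j < N → f j < N) (hd : ∀ j, j < N → f j ≠ j → d (f j) < d j)
    (j : Nat) (hj : j < N) : f (f^[N] j) = f^[N] j := by
  obtain ⟨m, hm, hfix⟩ := pvFixReach f N d hr hd j hj
  rw [pvFixStable f m N j hfix (by omega)]
  exact hfix

theorem pvRootStepF (f : Nat → Nat) (N : Nat) (d : Nat → Nat)
    (hr : ∀ j, j < N → f j < N) (hd : ∀ j, j < N → f j ≠ j → d (f j) < d j)
    (j : Nat) (hj : j < N) : f^[N] (f j) = f^[N] j := by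
  have h1 : f^[N] (f j) = f (f^[N] j) := by
    rw [← Function.iterate_succ_apply, Function.iterate_succ_apply']
  rw [h1, pvRootFixF f N d hr hd j hj]

-- d at the root is below d at any non-root element of its class
theorem pvDRootLtF (f : Nat → Nat) (N : Nat) (d : Nat → Nat)
    (hr : ∀ j, j < N → f j < N) (hd : ∀ j, j < N → f j ≠ j → d (f j) < d j) :
    ∀ c j, j < N → d j < c → f j ≠ j → d (f^[N] j) < d j := by
  intro c
  induction c with
  | zero => omega
  | succ c ih =>
    intro j hj hdj hne
    have hp : f j < N := hr j hj
    by_cases hfix : f (f j) = f j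
    · have : f^[N] (f j) = f j := Function.iterate_fixed hfix N
      rw [← pvRootStepF f N d hr hd j hj] at *
      rw [this]
      exact hd j hj hne
    · have hlt : d (f j) < d j := hd j hj hne
      have := ih (f j) hp (by omega) hfix
      rw [← pvRootStepF f N d hr hd j hj] at *
      omega

-- specialisations to a parent list
theorem pvRootLt (P : List Int) (d : Nat → Nat) (h : pvWF P d) (j : Nat)
    (hj : j < P.length) : pvRoot P j < P.length :=
  pvIterLt (pvPar P) P.length (fun j hj => (h.1 j hj).2) j hj P.length

theorem pvRootFix (P : List Int) (d : Nat → Nat) (h : pvWF P d) (j : Nat)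
    (hj : j < P.length) : pvPar P (pvRoot P j) = pvRoot P j :=
  pvRootFixF (pvPar P) P.length d (fun j hj => (h.1 j hj).2) h.2 j hj

theorem pvRootStep (P : List Int) (d : Nat → Nat) (h : pvWF P d) (j : Nat)
    (hj : j < P.length) : pvRoot P (pvPar P j) = pvRoot P j :=
  pvRootStepF (pvPar P) P.length d (fun j hj => (h.1 j hj).2) h.2 j hj

theorem pvDRootLt (P : List Int) (d : Nat → Nat) (h : pvWF P d) (j : Nat)
    (hj : j < P.length) (hne : pvPar P j ≠ j) : d (pvRoot P j) < d j :=
  pvDRootLtF (pvPar P) P.length d (fun j hj => (h.1 j hj).2) h.2 (d j + 1) j hj (by omega) hne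

theorem pvRootOfFix (P : List Int) (j : Nat) (hfix : pvPar P j = j) : pvRoot P j = j :=
  Function.iterate_fixed hfix P.length

theorem pvFixOfRootEq (P : List Int) (d : Nat → Nat) (h : pvWF P d) (j : Nat)
    (hj : j < P.length) (hroot : pvRoot P j = j) : pvPar P j = j := by
  by_contra hne
  have := pvDRootLt P d h j hj hne
  rw [hroot] at this
  omega

theorem pvGetDSetSelf (P : List Int) (i : Nat) (v : Int) (h : i < P.length) :
    (P.set i v).getD i 0 = v := by
  rw [List.getD_eq_getElem?_getD, List.getElem?_set_self (by simpa using h)]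
  rfl

theorem pvGetDSetNe (P : List Int) (i j : Nat) (v : Int) (h : j ≠ i) :
    (P.set i v).getD j 0 = P.getD j 0 := by
  rw [List.getD_eq_getElem?_getD, List.getElem?_set_ne (Ne.symm h), ← List.getD_eq_getElem?_getD]

theorem pvParSet (P : List Int) (i j : Nat) (r : Nat) (hi : i < P.length) :
    pvPar (P.set i (↑r)) j = if j = i then r else pvPar P j := by
  unfold pvPar
  by_cases h : j = i
  · subst h; rw [pvGetDSetSelf P j _ hi]; simp
  · rw [pvGetDSetNe P i j _ h, if_neg h]

-- well-foundedness after path compression: set x to (a cast of) its root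
theorem pvWFCompress (P : List Int) (d : Nat → Nat) (h : pvWF P d) (x : Nat)
    (hx : x < P.length) (hne : pvPar P x ≠ x) :
    pvWF (P.set x (↑(pvRoot P x))) d := by
  constructor
  · intro j hj
    simp only [List.length_set] at hj ⊢
    constructor
    · by_cases hji : j = x
      · subst hji; rw [pvGetDSetSelf P j _ hx]; exact Int.natCast_nonneg _
      · rw [pvGetDSetNe P x j _ hji]; exact (h.1 j hj).1
    · rw [pvParSet P x j _ hx]
      by_cases hji : j = x
      · subst hji; simp only [if_pos rfl]; exact pvRootLt P d h j hj
      · simp only [if_neg hji]; exact (h.1 j hj).2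
  · intro j hj
    simp only [List.length_set] at hj
    rw [pvParSet P x j _ hx]
    by_cases hji : j = x
    · subst hji; simp only [if_pos rfl]
      intro _
      exact pvDRootLt P d h j hj hne
    · simp only [if_neg hji]
      exact h.2 j hj

-- well-foundedness after union: hang root l under root w
theorem pvWFUnion (P : List Int) (d : Nat → Nat) (h : pvWF P d) (w l : Nat)
    (hw : w < P.length) (hl : l < P.length) (hwfx : pvPar P w = w) (hlf : pvPar P l = l)
    (hne : w ≠ l) :
    pvWF (P.set l (↑w)) (fun z => if pvRoot P z = l then d z + d w + 1 else d z) := by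
  constructor
  · intro j hj
    simp only [List.length_set] at hj ⊢
    constructor
    · by_cases hji : j = l
      · subst hji; rw [pvGetDSetSelf P j _ hl]; exact Int.natCast_nonneg _
      · rw [pvGetDSetNe P l j _ hji]; exact (h.1 j hj).1
    · rw [pvParSet P l j _ hl]
      by_cases hji : j = l
      · subst hji; simp only [if_pos rfl]; exact hw
      · simp only [if_neg hji]; exact (h.1 j hj).2
  · intro j hj
    simp only [List.length_set] at hj
    rw [pvParSet P l j _ hl]
    by_cases hji : j = l
    · subst hji
      simp only [if_pos rfl]
      intro _
      have hrw : pvRoot P w = w := pvRootOfFix P w hwfx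
      have hrl : pvRoot P j = j := pvRootOfFix P j hlf
      simp [hrw, hrl, hne]
    · simp only [if_neg hji]
      intro hne2
      have hstep : pvRoot P (pvPar P j) = pvRoot P j := pvRootStep P d h j hj
      have := h.2 j hj hne2
      by_cases hb : pvRoot P j = l <;> simp [hstep, hb] <;> omega

-- roots after P.set x ↑r, where r is a root and either r = root x (compression) or x is a root (union)
theorem pvRootSet (P : List Int) (d d' : Nat → Nat) (h : pvWF P d) (x : Nat)
    (hx : x < P.length) (r : Nat) (hrlt : r < P.length) (hrfix : pvPar P r = r)
    (hxr : x ≠ r) (hcase : r = pvRoot P x ∨ pvPar P x = x)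
    (hwf' : pvWF (P.set x (↑r)) d') :
    ∀ j, j < P.length → pvRoot (P.set x (↑r)) j = if pvRoot P j = pvRoot P x then r else pvRoot P j := by
  have hlen : (P.set x (↑r)).length = P.length := by simp
  have hpar : ∀ j, pvPar (P.set x (↑r)) j = if j = x then r else pvPar P j :=
    fun j => pvParSet P x j r hx
  -- strong induction on d j
  suffices H : ∀ c j, j < P.length → d j < c → pvRoot (P.set x (↑r)) j = if pvRoot P j = pvRoot P x then r else pvRoot P j by
    intro j hj; exact H (d j + 1) j hj (by omega)
  intro c
  induction c with
  | zero => omega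
  | succ c ih =>
    intro j hj hdj
    by_cases hjx : j = x
    · subst hjx
      -- new parent of j is r, which is a fixpoint of the new array
      have hrfix' : pvPar (P.set j (↑r)) r = r := by rw [hpar, if_neg (Ne.symm hxr)]; exact hrfix
      have hroot_r : pvRoot (P.set j (↑r)) r = r := pvRootOfFix _ r hrfix'
      have hstep' : pvRoot (P.set j (↑r)) (pvPar (P.set j (↑r)) j) = pvRoot (P.set j (↑r)) j := by
        apply pvRootStep _ d' hwf'
        rw [hlen]; exact hj
      rw [hpar, if_pos rfl] at hstep'
      rw [← hstep', hroot_r, if_pos rfl]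
    · by_cases hfix : pvPar P j = j
      · -- j is a root, j ≠ x, so still a root
        have hfix' : pvPar (P.set x (↑r)) j = j := by rw [hpar, if_neg hjx]; exact hfix
        have hrj : pvRoot P j = j := pvRootOfFix P j hfix
        rw [pvRootOfFix _ j hfix', hrj]
        split_ifs with hjr
        · rcases hcase with hc | hc
          · exact hjr.trans hc.symm
          · exact absurd (hjr.trans (pvRootOfFix P x hc)) hjx
        · rfl
      · -- j is not a root: step to its parent
        have hfix' : pvPar (P.set x (↑r)) j ≠ j := by rw [hpar, if_neg hjx]; exact hfix
        have hstep' : pvRoot (P.set x (↑r)) (pvPar (P.set x (↑r)) j) = pvRoot (P.set x (↑r)) j := by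
          apply pvRootStep _ d' hwf'
          rw [hlen]; exact hj
        have hplt : pvPar P j < P.length := (h.1 j hj).2
        have hdlt : d (pvPar P j) < d j := h.2 j hj hfix
        have hih := ih (pvPar P j) hplt (by omega)
        have hstep : pvRoot P (pvPar P j) = pvRoot P j := pvRootStep P d h j hj
        rw [← hstep', hpar, if_neg hjx, hih, hstep]

theorem pvGetDlt (P : List Int) (x : Nat) (hx : x < P.length) :
    PySem.List.pyGet? P (↑x) = some (P.getD x 0) := by
  rw [PySem.List.pyGet?_natCast]
  simp [List.getElem?_eq_getElem hx, List.getD_eq_getElem?_getD]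

theorem pvFindAux : ∀ (fuel : Nat) (P : List Int) (d : Nat → Nat), pvWF P d → ∀ (x : Nat), x < P.length →
    (∃ m, m < fuel ∧ pvPar P ((pvPar P)^[m] x) = (pvPar P)^[m] x) →
    ∃ P', findset P (↑x) fuel = (P', ↑(pvRoot P x)) ∧ P'.length = P.length ∧ pvWF P' d ∧
          ∀ j, j < P.length → pvRoot P' j = pvRoot P j := by
  intro fuel
  induction fuel with
  | zero => intro P d hwf x hx hm; obtain ⟨m, hm, _⟩ := hm; omega
  | succ fuel ih =>
    intro P d hwf x hx hm
    have hget := pvGetDlt P x hx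
    have hnn : 0 ≤ P.getD x 0 := (hwf.1 x hx).1
    have hplt : pvPar P x < P.length := (hwf.1 x hx).2
    by_cases hfix : pvPar P x = x
    · -- root: returns immediately
      have hpx : P.getD x 0 = ↑x := by
        have : (P.getD x 0).toNat = x := hfix
        omega
      have hroot : pvRoot P x = x := pvRootOfFix P x hfix
      refine ⟨P, ?_, rfl, hwf, fun j _ => rfl⟩
      simp only [findset, hget]
      rw [if_pos hpx, hroot]
    · have hpx : P.getD x 0 ≠ ↑x := by
        intro hc
        apply hfix
        unfold pvPar
        omega
      have hcast : P.getD x 0 = ↑(pvPar P x) := by unfold pvPar; omega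
      -- fixpoint reach index for the parent
      obtain ⟨m, hmf, hmfix⟩ := hm
      have hm0 : m ≠ 0 := by
        intro hc; subst hc; exact hfix hmfix
      have hm' : ∃ m', m' < fuel ∧ pvPar P ((pvPar P)^[m'] (pvPar P x)) = (pvPar P)^[m'] (pvPar P x) := by
        refine ⟨m - 1, by omega, ?_⟩
        have : (pvPar P)^[m] x = (pvPar P)^[m-1] (pvPar P x) := by
          conv_lhs => rw [show m = (m-1) + 1 by omega]
          rw [Function.iterate_succ_apply]
        rw [← this]; exact hmfix
      obtain ⟨P', heq, hlen', hwf', hroots'⟩ := ih P d hwf (pvPar P x) hplt hm'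
      have hrootstep : pvRoot P (pvPar P x) = pvRoot P x := pvRootStep P d hwf x hx
      rw [hrootstep] at heq
      -- the result of the recursive call
      set r := pvRoot P x with hr
      have hrlt : r < P.length := pvRootLt P d hwf x hx
      have hrne : r ≠ x := by
        intro hc
        have hd := pvDRootLt P d hwf x hx hfix
        rw [← hr, hc] at hd
        omega
      -- the final state: P'.set x ↑r
      have hparx' : pvPar P' x ≠ x := by
        intro hc
        have : pvRoot P' x = x := pvRootOfFix P' x hc
        rw [hroots' x hx, ← hr] at this
        exact hrne (by omega)
      have hrx' : pvRoot P' x = r := by rw [hroots' x hx]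
      have hwf2 : pvWF (P'.set x (↑r)) d := by
        have := pvWFCompress P' d hwf' x (by omega) hparx'
        rw [hrx'] at this
        exact this
      refine ⟨P'.set x (↑r), ?_, by simp [hlen'], hwf2, ?_⟩
      · -- computation
        simp only [findset, hget]
        rw [if_neg hpx]
        simp only [hcast, heq]
        rw [PySem.List.pySetD_natCast]
      · -- roots preserved
        intro j hj
        have hrfix' : pvPar P' r = r := by
          apply pvFixOfRootEq P' d hwf' r (by omega)
          rw [hroots' r hrlt]
          exact pvRootOfFix P r (pvRootFix P d hwf x hx)
        have := pvRootSet P' d d hwf' x (by omega) r (by omega) hrfix' (Ne.symm hrne)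
          (Or.inl hrx'.symm) hwf2 j (by omega)
        rw [this, hroots' j (by omega), hrx']
        split_ifs with hc
        · rw [← hc]
        · rfl
theorem pvSetNeg (xs : List Int) (x : Int) (v : Int) (h1 : -(xs.length:Int) ≤ x) (h2 : x < 0) :
    PySem.List.pySetD xs x v = xs.set ((xs.length : Int) + x).toNat v := by
  simp only [PySem.List.pySetD, PySem.List.pySet?, PySem.List.pyIdx?, if_neg (by omega : ¬ (0:Int) ≤ x), if_pos h1]
  simp only [Option.map_some, Option.getD_some]
  congr 1
  omega
theorem pvGetNeg (xs : List Int) (x : Int) (h1 : -(xs.length:Int) ≤ x) (h2 : x < 0) :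
    PySem.List.pyGet? xs x = xs[((xs.length : Int) + x).toNat]? := by
  have hk : x = -(((-x).toNat : Nat) : Int) := by omega
  rw [hk, PySem.List.pyGet?_neg_natCast xs ((-x).toNat) (by omega) (by omega)]
  congr 1
  omega

def pvIx (N : Nat) (x : Int) : Nat := if x < 0 then ((N:Int) + x).toNat else x.toNat

-- setting a node to (a cast of) its own root keeps lengths, well-foundedness and roots
theorem pvSetRootProps (P' : List Int) (d : Nat → Nat) (hwf' : pvWF P' d) (j0 : Nat)
    (hj0 : j0 < P'.length) (r : Nat) (hr : r = pvRoot P' j0) :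
    (P'.set j0 (↑r)).length = P'.length ∧ pvWF (P'.set j0 (↑r)) d ∧
      ∀ j, j < P'.length → pvRoot (P'.set j0 (↑r)) j = pvRoot P' j := by
  by_cases hfix : pvPar P' j0 = j0
  · have hrj : r = j0 := by rw [hr, pvRootOfFix P' j0 hfix]
    subst hrj
    have hgd : P'.getD r 0 = ↑r := by
      have h1 := (hwf'.1 r hj0).1
      unfold pvPar at hfix
      omega
    have hel : P'[r] = ↑r := by
      rw [List.getD_eq_getElem?_getD, List.getElem?_eq_getElem hj0] at hgd
      simpa using hgd
    have hset : P'.set r (↑r) = P' := by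
      calc P'.set r ((r:Int)) = P'.set r P'[r] := by rw [hel]
        _ = P' := List.set_getElem_self ..
    rw [hset]
    exact ⟨rfl, hwf', fun j _ => rfl⟩
  · have hrne : r ≠ j0 := by
      intro hc
      have hd := pvDRootLt P' d hwf' j0 hj0 hfix
      rw [← hr, hc] at hd
      omega
    have hwf2 : pvWF (P'.set j0 (↑r)) d := by
      have := pvWFCompress P' d hwf' j0 hj0 hfix
      rw [← hr] at this
      exact this
    refine ⟨by simp, hwf2, ?_⟩
    intro j hj
    have hrfix' : pvPar P' r = r := by rw [hr]; exact pvRootFix P' d hwf' j0 hj0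
    have := pvRootSet P' d d hwf' j0 hj0 r (by rw [hr]; exact pvRootLt P' d hwf' j0 hj0)
      hrfix' (Ne.symm hrne) (Or.inl hr) hwf2 j hj
    rw [this]
    split_ifs with hc
    · rw [hc, hr]
    · rfl

theorem pvFindSpec (P : List Int) (d : Nat → Nat) (hwf : pvWF P d) (x : Int)
    (h1 : -(P.length:Int) ≤ x) (h2 : x < (P.length:Int)) :
    ∃ P', findset P x P.length = (P', ↑(pvRoot P (pvIx P.length x))) ∧ P'.length = P.length ∧
      pvWF P' d ∧ ∀ j, j < P.length → pvRoot P' j = pvRoot P j := by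
  have hr' : ∀ j, j < P.length → pvPar P j < P.length := fun j hj => (hwf.1 j hj).2
  by_cases hx : 0 ≤ x
  · have hxt : x = ((x.toNat : Nat) : Int) := by omega
    have hxlt : x.toNat < P.length := by omega
    have hIx : pvIx P.length x = x.toNat := by unfold pvIx; rw [if_neg (by omega)]
    rw [hIx, hxt]
    obtain ⟨m, hm, hmfix⟩ := pvFixReach (pvPar P) P.length d hr' hwf.2 x.toNat hxlt
    exact pvFindAux P.length P d hwf x.toNat hxlt ⟨m, hm, hmfix⟩
  · -- negative index: wraps to j0
    have hxneg : x < 0 := by omega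
    have hN1 : 1 ≤ P.length := by omega
    set j0 := ((P.length : Int) + x).toNat with hj0def
    have hj0 : j0 < P.length := by omega
    have hIx : pvIx P.length x = j0 := by unfold pvIx; rw [if_pos hxneg]
    have hget : PySem.List.pyGet? P x = some (P.getD j0 0) := by
      rw [pvGetNeg P x h1 hxneg, List.getElem?_eq_getElem hj0]
      rw [List.getD_eq_getElem?_getD, List.getElem?_eq_getElem hj0]
      rfl
    have hnn : 0 ≤ P.getD j0 0 := (hwf.1 j0 hj0).1
    have hplt : pvPar P j0 < P.length := (hwf.1 j0 hj0).2
    have hpx : P.getD j0 0 ≠ x := by omega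
    have hcast : P.getD j0 0 = ↑(pvPar P j0) := by unfold pvPar; omega
    set r := pvRoot P j0 with hrdef
    have hrootstep : pvRoot P (pvPar P j0) = pvRoot P j0 := pvRootStep P d hwf j0 hj0
    -- the recursive call computes the root of j0
    have hrec : ∃ P', findset P (↑(pvPar P j0)) (P.length - 1) = (P', ↑r) ∧
        P'.length = P.length ∧ pvWF P' d ∧ ∀ j, j < P.length → pvRoot P' j = pvRoot P j := by
      by_cases hfix : pvPar P j0 = j0
      · have hrj : r = j0 := by rw [hrdef, pvRootOfFix P j0 hfix]
        refine ⟨P, ?_, rfl, hwf, fun j _ => rfl⟩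
        rw [hfix, hrj]
        cases hpl : P.length - 1 with
        | zero => simp [findset]
        | succ nm =>
          have hgd : P.getD j0 0 = ↑j0 := by unfold pvPar at hfix; omega
          simp only [findset, pvGetDlt P j0 hj0]
          rw [if_pos hgd]
      · obtain ⟨m, hm, hmfix⟩ := pvFixReach (pvPar P) P.length d hr' hwf.2 j0 hj0
        have hm0 : m ≠ 0 := fun hc => hfix (by simpa [hc] using hmfix)
        have hm' : ∃ m', m' < P.length - 1 ∧
            pvPar P ((pvPar P)^[m'] (pvPar P j0)) = (pvPar P)^[m'] (pvPar P j0) := by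
          refine ⟨m - 1, by omega, ?_⟩
          have : (pvPar P)^[m] j0 = (pvPar P)^[m-1] (pvPar P j0) := by
            conv_lhs => rw [show m = (m-1) + 1 by omega]
            rw [Function.iterate_succ_apply]
          rw [← this]; exact hmfix
        obtain ⟨P', heq, hlen', hwf', hroots'⟩ := pvFindAux (P.length - 1) P d hwf (pvPar P j0) hplt hm'
        rw [hrootstep] at heq
        exact ⟨P', heq, hlen', hwf', hroots'⟩
    obtain ⟨P', heq, hlen', hwf', hroots'⟩ := hrec
    have hrP' : r = pvRoot P' j0 := by rw [hroots' j0 hj0]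
    obtain ⟨hlen2, hwf2, hroots2⟩ := pvSetRootProps P' d hwf' j0 (by omega) r hrP'
    refine ⟨P'.set j0 (↑r), ?_, by simp [hlen'], hwf2, ?_⟩
    · -- computation
      have hfuel : P.length = (P.length - 1) + 1 := by omega
      rw [hIx, ← hrdef]
      conv_lhs => rw [hfuel]
      simp only [findset, hget]
      rw [if_neg hpx]
      simp only [hcast, heq]
      rw [pvSetNeg P' x (↑r) (by rw [hlen']; exact h1) hxneg]
      rw [show (((P'.length : Int)) + x).toNat = j0 by rw [hlen']]
    · intro j hj
      rw [hroots2 j (by omega), hroots' j hj]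

theorem pvMergeIff (w l ru rv rx ry : Nat) (hwl : w ≠ l)
    (hset : (w = rx ∧ l = ry) ∨ (w = ry ∧ l = rx)) :
    ((if ru = l then w else ru) = (if rv = l then w else rv)) ↔
      (ru = rv ∨ (ru = rx ∧ rv = ry) ∨ (rv = rx ∧ ru = ry)) := by
  rcases hset with ⟨rfl, rfl⟩ | ⟨rfl, rfl⟩ <;>
    by_cases h1 : ru = l <;> by_cases h2 : rv = l <;> simp [h1, h2] <;> omega

theorem pvUniteSpec (P S : List Int) (d : Nat → Nat) (hwf : pvWF P d) (x y : Int)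
    (hx0 : 0 ≤ x) (hx1 : x < (P.length:Int)) (hy0 : 0 ≤ y) (hy1 : y < (P.length:Int)) :
    ∃ P2 S2 d2, unite P S x y = (P2, S2) ∧ P2.length = P.length ∧ pvWF P2 d2 ∧
      ∀ u, u < P.length → ∀ v, v < P.length →
        (pvRoot P2 u = pvRoot P2 v ↔ (pvRoot P u = pvRoot P v ∨
          (pvRoot P u = pvRoot P x.toNat ∧ pvRoot P v = pvRoot P y.toNat) ∨
          (pvRoot P v = pvRoot P x.toNat ∧ pvRoot P u = pvRoot P y.toNat))) := by
  obtain ⟨P1, heq1, hlen1, hwf1, hroots1⟩ := pvFindSpec P d hwf x (by omega) hx1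
  have hIx : pvIx P.length x = x.toNat := by unfold pvIx; rw [if_neg (by omega)]
  rw [hIx] at heq1
  set rx := pvRoot P x.toNat with hrxdef
  obtain ⟨P2, heq2, hlen2, hwf2, hroots2⟩ := pvFindSpec P1 d hwf1 y (by omega) (by omega)
  have hIy : pvIx P1.length y = y.toNat := by unfold pvIx; rw [if_neg (by omega)]
  rw [hIy] at heq2
  have hylt : y.toNat < P.length := by omega
  have hxlt : x.toNat < P.length := by omega
  have hry1 : pvRoot P1 y.toNat = pvRoot P y.toNat := hroots1 y.toNat hylt
  rw [hry1] at heq2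
  set ry := pvRoot P y.toNat with hrydef
  rw [hlen1] at heq2
  have hroots12 : ∀ j, j < P.length → pvRoot P2 j = pvRoot P j := by
    intro j hj
    rw [hroots2 j (by omega), hroots1 j hj]
  have hrxlt : rx < P.length := pvRootLt P d hwf x.toNat hxlt
  have hrylt : ry < P.length := pvRootLt P d hwf y.toNat hylt
  -- unfold unite
  have hu : unite P S x y =
      (if (rx:Int) = (ry:Int) then (P2, S)
       else
        let sx := (PySem.List.pyGet? S (rx:Int)).getD 0
        let sy := (PySem.List.pyGet? S (ry:Int)).getD 0
        let p := if sx < sy then ((ry:Int), (rx:Int)) else ((rx:Int), (ry:Int))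
        (PySem.List.pySetD P2 p.2 p.1,
         PySem.List.pySetD S p.1 ((PySem.List.pyGet? S p.1).getD 0 + (PySem.List.pyGet? S p.2).getD 0))) := by
    simp only [unite, heq1, hlen1, heq2]
  by_cases hrxy : rx = ry
  · rw [if_pos (by exact_mod_cast hrxy)] at hu
    refine ⟨P2, S, d, hu, by omega, hwf2, ?_⟩
    intro u hu' v hv'
    rw [hroots12 u hu', hroots12 v hv']
    constructor
    · intro h; exact Or.inl h
    · rintro (h | ⟨h1, h2⟩ | ⟨h1, h2⟩) <;> omega
  · rw [if_neg (by exact_mod_cast hrxy)] at hu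
    -- both roots are still roots of P2
    have hfixrx : pvPar P2 rx = rx := by
      apply pvFixOfRootEq P2 d hwf2 rx (by omega)
      rw [hroots12 rx hrxlt]
      exact pvRootOfFix P rx (pvRootFix P d hwf x.toNat hxlt)
    have hfixry : pvPar P2 ry = ry := by
      apply pvFixOfRootEq P2 d hwf2 ry (by omega)
      rw [hroots12 ry hrylt]
      exact pvRootOfFix P ry (pvRootFix P d hwf y.toNat hylt)
    -- winner/loser
    set sx := (PySem.List.pyGet? S (rx:Int)).getD 0
    set sy := (PySem.List.pyGet? S (ry:Int)).getD 0
    obtain ⟨w, l, hwl, hp⟩ : ∃ w l : Nat, ((w = rx ∧ l = ry) ∨ (w = ry ∧ l = rx)) ∧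
        (if sx < sy then ((ry:Int), (rx:Int)) else ((rx:Int), (ry:Int))) = ((w:Int), (l:Int)) := by
      by_cases hs : sx < sy
      · exact ⟨ry, rx, Or.inr ⟨rfl, rfl⟩, by rw [if_pos hs]⟩
      · exact ⟨rx, ry, Or.inl ⟨rfl, rfl⟩, by rw [if_neg hs]⟩
    simp only [hp] at hu
    have hwne : w ≠ l := by rcases hwl with ⟨rfl, rfl⟩ | ⟨rfl, rfl⟩ <;> omega
    have hwlt : w < P.length := by rcases hwl with ⟨rfl, rfl⟩ | ⟨rfl, rfl⟩ <;> omega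
    have hllt : l < P.length := by rcases hwl with ⟨rfl, rfl⟩ | ⟨rfl, rfl⟩ <;> omega
    have hfw : pvPar P2 w = w := by rcases hwl with ⟨rfl, rfl⟩ | ⟨rfl, rfl⟩ <;> assumption
    have hfl : pvPar P2 l = l := by rcases hwl with ⟨rfl, rfl⟩ | ⟨rfl, rfl⟩ <;> assumption
    have hset : PySem.List.pySetD P2 (l:Int) (w:Int) = P2.set l (↑w) := PySem.List.pySetD_natCast P2 l _
    simp only [hset] at hu
    set d2 := fun z => if pvRoot P2 z = l then d z + d w + 1 else d z with hd2
    have hwf3 : pvWF (P2.set l (↑w)) d2 := pvWFUnion P2 d hwf2 w l (by omega) (by omega) hfw hfl hwne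
    have hroots3 : ∀ j, j < P.length → pvRoot (P2.set l (↑w)) j =
        if pvRoot P2 j = pvRoot P2 l then w else pvRoot P2 j := by
      intro j hj
      exact pvRootSet P2 d d2 hwf2 l (by omega) w (by omega) hfw (Ne.symm hwne)
        (Or.inr hfl) hwf3 j (by omega)
    have hrl2 : pvRoot P2 l = l := pvRootOfFix P2 l hfl
    refine ⟨P2.set l (↑w), _, d2, hu, by simp; omega, hwf3, ?_⟩
    intro u hu' v hv'
    rw [hroots3 u hu', hroots3 v hv', hrl2, hroots12 u hu', hroots12 v hv']
    exact pvMergeIff w l (pvRoot P u) (pvRoot P v) rx ry hwne hwl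

def pvGood (P L : List Int) (N : Nat) : Prop :=
  P.length = N ∧ L.length = N ∧ (∃ d, pvWF P d) ∧
  ∀ u, u < N → ∀ v, v < N → (pvRoot P u = pvRoot P v ↔ L.getD u 0 = L.getD v 0)

def pvRel (N : Nat) (a : List Int × List Int × List Int) (b : List Int × List Int) : Prop :=
  a.2.2 = b.2 ∧ pvGood a.1 b.1 N

theorem pvSubstIff (a b lu lv : Int) (hab : a ≠ b) :
    ((if lu = b then a else lu) = (if lv = b then a else lv)) ↔
      (lu = lv ∨ (lu = a ∧ lv = b) ∨ (lv = a ∧ lu = b)) := by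
  by_cases h1 : lu = b <;> by_cases h2 : lv = b <;> simp [h1, h2] <;> omega

theorem pvGetDMap (L : List Int) (f : Int → Int) (u : Nat) (hu : u < L.length) :
    (L.map f).getD u 0 = f (L.getD u 0) := by
  rw [List.getD_eq_getElem?_getD, List.getElem?_map, List.getElem?_eq_getElem hu,
      List.getD_eq_getElem?_getD, List.getElem?_eq_getElem hu]
  rfl

theorem pvGetPos (L : List Int) (i : Int) (h0 : 0 ≤ i) (h1 : i < (L.length:Int)) :
    (PySem.List.pyGet? L i).getD 0 = L.getD i.toNat 0 := by
  rw [PySem.List.pyGet?_of_nonneg L h0, List.getElem?_eq_getElem (by omega),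
      List.getD_eq_getElem?_getD, List.getElem?_eq_getElem (by omega)]

theorem pvGetWrap (L : List Int) (i : Int) (h0 : -(L.length:Int) ≤ i) (h1 : i < (L.length:Int)) :
    (PySem.List.pyGet? L i).getD 0 = L.getD (pvIx L.length i) 0 := by
  by_cases h : i < 0
  · rw [pvGetNeg L i h0 h]
    unfold pvIx
    rw [if_pos h, List.getElem?_eq_getElem (by omega), List.getD_eq_getElem?_getD,
        List.getElem?_eq_getElem (by omega)]
  · unfold pvIx
    rw [if_neg h]
    exact pvGetPos L i (by omega) h1

theorem pvFoldRel {α β γ : Type} (R : β → γ → Prop) (f : β → α → β) (g : γ → α → γ) :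
    ∀ (l : List α) (b : β) (c : γ), R b c → (∀ x ∈ l, ∀ b c, R b c → R (f b x) (g c x)) →
    R (l.foldl f b) (l.foldl g c) := by
  intro l
  induction l with
  | nil => intro b c h _; exact h
  | cons x xs ih =>
    intro b c h hstep
    exact ih (f b x) (g c x) (hstep x List.mem_cons_self b c h)
      (fun z hz b c h => hstep z (List.mem_cons_of_mem x hz) b c h)

theorem pvInnerStep (n : Int) (N : Nat) (hN : N = n.toNat) (i k : Int)
    (hi : 1 ≤ i) (hk : 2 ≤ k) (hik : i * k ≤ n)
    (st2 : List Int × List Int × List Int) (t2 : List Int × List Int)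
    (hR : pvRel N st2 t2) :
    pvRel N
      ((unite st2.1 st2.2.1 (i-1) (i*k-1)).1, (unite st2.1 st2.2.1 (i-1) (i*k-1)).2,
        PySem.List.pySetD st2.2.2 (i*k) 1)
      ((if ((PySem.List.pyGet? t2.1 (i-1)).getD 0 ≠ (PySem.List.pyGet? t2.1 (i*k-1)).getD 0)
          then t2.1.map (fun v => if v = (PySem.List.pyGet? t2.1 (i*k-1)).getD 0
                                  then (PySem.List.pyGet? t2.1 (i-1)).getD 0 else v)
          else t2.1),
        PySem.List.pySetD t2.2 (i*k) 1) := by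
  obtain ⟨hV, hlenP, hlenL, ⟨d, hwf⟩, hglue⟩ := hR
  have hklo : (1:Int) * k ≤ i * k := mul_le_mul_of_nonneg_right (by omega) (by omega)
  have hiik : i * 1 < i * k := by
    apply mul_lt_mul_of_pos_left (by omega) (by omega)
  have hik2 : 2 ≤ i * k := by omega
  have hilt : i - 1 < i * k - 1 := by omega
  have hn1 : 1 ≤ n := by omega
  have hNn : (N:Int) = n := by omega
  set u0 := (i - 1).toNat with hu0
  set v0 := (i * k - 1).toNat with hv0
  have hu0lt : u0 < N := by omega
  have hv0lt : v0 < N := by omega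
  obtain ⟨P2, S2, d2, hueq, hlen2, hwf2, hpart⟩ :=
    pvUniteSpec st2.1 st2.2.1 d hwf (i-1) (i*k-1) (by omega) (by omega) (by omega) (by omega)
  have ht1 : (i-1).toNat = u0 := rfl
  have hv1 : (i*k-1).toNat = v0 := rfl
  rw [ht1, hv1] at hpart
  have hla : (PySem.List.pyGet? t2.1 (i-1)).getD 0 = t2.1.getD u0 0 :=
    pvGetPos t2.1 (i-1) (by omega) (by omega)
  have hlb : (PySem.List.pyGet? t2.1 (i*k-1)).getD 0 = t2.1.getD v0 0 :=
    pvGetPos t2.1 (i*k-1) (by omega) (by omega)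
  set a := t2.1.getD u0 0 with ha
  set b := t2.1.getD v0 0 with hb
  rw [hla, hlb]
  constructor
  · simp only [hV]
  · by_cases hab : a = b
    · rw [if_neg (by omega)]
      refine ⟨by simp only [hueq]; omega, hlenL, ⟨d2, by simp only [hueq]; exact hwf2⟩, ?_⟩
      intro u hu v hv
      simp only [hueq]
      rw [hpart u (by omega) v (by omega)]
      have hgl_uv := hglue u hu v hv
      have hgl_ux := hglue u hu u0 hu0lt
      have hgl_vy := hglue v hv v0 hv0lt
      have hgl_xy := hglue u0 hu0lt v0 hv0lt
      have hxy : pvRoot st2.1 u0 = pvRoot st2.1 v0 := hgl_xy.mpr hab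
      constructor
      · rintro (h | ⟨h1, h2⟩ | ⟨h1, h2⟩) <;> [skip; skip; skip] <;>
          · apply hgl_uv.mp
            omega
      · intro h
        exact Or.inl (hgl_uv.mpr h)
    · rw [if_pos (by omega)]
      refine ⟨by simp only [hueq]; omega, by simp [hlenL], ⟨d2, by simp only [hueq]; exact hwf2⟩, ?_⟩
      intro u hu v hv
      simp only [hueq]
      rw [hpart u (by omega) v (by omega)]
      rw [pvGetDMap t2.1 _ u (by omega), pvGetDMap t2.1 _ v (by omega)]
      rw [pvSubstIff a b (t2.1.getD u 0) (t2.1.getD v 0) hab]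
      rw [← hglue u hu v hv, ← hglue u hu u0 hu0lt, ← hglue v hv v0 hv0lt,
          ← hglue v hv u0 hu0lt, ← hglue u hu v0 hv0lt]

theorem pvGoodTrans (P P' L : List Int) (N : Nat) (hG : pvGood P L N)
    (hlen : P'.length = P.length) (d : Nat → Nat) (hwf' : pvWF P' d)
    (hroots : ∀ j, j < P.length → pvRoot P' j = pvRoot P j) : pvGood P' L N := by
  obtain ⟨hlenP, hlenL, _, hglue⟩ := hG
  refine ⟨by omega, hlenL, ⟨d, hwf'⟩, ?_⟩
  intro u hu v hv
  rw [hroots u (by omega), hroots v (by omega)]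
  exact hglue u hu v hv

theorem pvQueryFold (n : Int) (N : Nat) (hN : N = n.toNat) (L : List Int) (hlenL : L.length = N) :
    ∀ (qs : List (List Int)) (P : List Int) (acc : List Bool),
    pvGood P L N →
    (∀ q ∈ qs, 2 ≤ q.length ∧ 1 - n ≤ q.getD 0 0 ∧ q.getD 0 0 ≤ n ∧
       1 - n ≤ q.getD 1 0 ∧ q.getD 1 0 ≤ n) →
    (qs.foldl (fun (acc : List Int × List Bool) q =>
        ((connectedA acc.1 ((PySem.List.pyGet? q 0).getD 0 - 1) ((PySem.List.pyGet? q 1).getD 0 - 1)).1,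
         acc.2 ++ [(connectedA acc.1 ((PySem.List.pyGet? q 0).getD 0 - 1) ((PySem.List.pyGet? q 1).getD 0 - 1)).2]))
      (P, acc)).2
    = acc ++ qs.map (fun q =>
        decide ((PySem.List.pyGet? L ((PySem.List.pyGet? q 0).getD 0 - 1)).getD 0
              = (PySem.List.pyGet? L ((PySem.List.pyGet? q 1).getD 0 - 1)).getD 0)) := by
  intro qs
  induction qs with
  | nil => intro P acc _ _; simp
  | cons q qs ih =>
    intro P acc hG hqs
    obtain ⟨hqlen, ha0, ha1, hb0, hb1⟩ := hqs q List.mem_cons_self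
    have hn1 : 1 ≤ n := by omega
    have hNn : (N:Int) = n := by omega
    obtain ⟨hlenP, _, ⟨d, hwf⟩, hglue⟩ := hG
    have hq0 : PySem.List.pyGet? q 0 = some (q.getD 0 0) := by
      have := pvGetDlt q 0 (by omega)
      simpa using this
    have hq1 : PySem.List.pyGet? q 1 = some (q.getD 1 0) := by
      have := pvGetDlt q 1 (by omega)
      simpa using this
    set x := q.getD 0 0 - 1 with hxdef
    set y := q.getD 1 0 - 1 with hydef
    have hxlo : -(P.length:Int) ≤ x := by omega
    have hxhi : x < (P.length:Int) := by omega
    obtain ⟨P1, heq1, hlen1, hwf1, hroots1⟩ := pvFindSpec P d hwf x hxlo hxhi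
    obtain ⟨P2, heq2, hlen2, hwf2, hroots2⟩ := pvFindSpec P1 d hwf1 y (by omega) (by omega)
    have hconn : connectedA P x y =
        (P2, decide ((↑(pvRoot P (pvIx P.length x)) : Int) = ↑(pvRoot P1 (pvIx P1.length y)))) := by
      simp only [connectedA, heq1, heq2]
    have hIxx : pvIx P.length x < N := by unfold pvIx; split <;> omega
    have hIyy : pvIx P1.length y < N := by unfold pvIx; split <;> omega
    have hry : pvRoot P1 (pvIx P1.length y) = pvRoot P (pvIx P1.length y) :=
      hroots1 _ (by omega)
    have hIxsame : pvIx P1.length y = pvIx P.length y := by rw [hlen1]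
    have hval : decide ((↑(pvRoot P (pvIx P.length x)) : Int) = ↑(pvRoot P1 (pvIx P1.length y)))
        = decide ((PySem.List.pyGet? L x).getD 0 = (PySem.List.pyGet? L y).getD 0) := by
      rw [pvGetWrap L x (by omega) (by omega), pvGetWrap L y (by omega) (by omega)]
      apply decide_eq_decide.mpr
      rw [hry, hIxsame]
      have hLP : pvIx L.length x = pvIx P.length x := by rw [hlenL, hlenP]
      have hLP2 : pvIx L.length y = pvIx P.length y := by rw [hlenL, hlenP]
      rw [hLP, hLP2]
      rw [Int.natCast_inj]
      exact hglue _ (by omega) _ (by omega)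
    have hG2 : pvGood P2 L N := by
      apply pvGoodTrans P1 P2 L N _ (by omega) d hwf2 (fun j hj => hroots2 j (by omega))
      exact pvGoodTrans P P1 L N ⟨hlenP, hlenL, ⟨d, hwf⟩, hglue⟩ hlen1 d hwf1 hroots1
    simp only [List.foldl_cons, List.map_cons, hq0, hq1, Option.getD_some]
    rw [← hxdef, ← hydef, hconn]
    have := ih P2 (acc ++ [decide ((PySem.List.pyGet? L x).getD 0 = (PySem.List.pyGet? L y).getD 0)])
      hG2 (fun q' hq' => hqs q' (List.mem_cons_of_mem q hq'))
    simp only [hval]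
    rw [this]
    simp

theorem pvGoodInit (n : Int) :
    pvGood (PySem.List.pyRange 0 n 1) (PySem.List.pyRange 0 n 1) n.toNat := by
  have hlen : (PySem.List.pyRange 0 n 1).length = n.toNat := by
    rw [PySem.List.length_pyRange_one]
    omega
  have hgd : ∀ j, j < n.toNat → (PySem.List.pyRange 0 n 1).getD j 0 = (j:Int) := by
    intro j hj
    rw [List.getD_eq_getElem?_getD, List.getElem?_eq_getElem (by omega)]
    rw [PySem.List.getElem_pyRange_one]
    simp
  have hpar : ∀ j, j < n.toNat → pvPar (PySem.List.pyRange 0 n 1) j = j := by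
    intro j hj
    unfold pvPar
    rw [hgd j hj]
    omega
  refine ⟨hlen, hlen, ⟨fun _ => 0, ?_, ?_⟩, ?_⟩
  · intro j hj
    rw [hlen] at hj
    rw [hlen, hgd j hj, hpar j hj]
    constructor
    · exact Int.natCast_nonneg j
    · omega
  · intro j hj
    rw [hlen] at hj
    rw [hpar j hj]
    intro h
    omega
  · intro u hu v hv
    rw [pvRootOfFix _ u (hpar u hu), pvRootOfFix _ v (hpar v hv), hgd u hu, hgd v hv]
    omega

theorem pvMain (n threshold : Int) (queries : List (List Int))
    (hPre1 : 0 ≤ threshold ∨ n ≤ threshold)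
    (hPre2 : ∀ q ∈ queries, 2 ≤ q.length ∧ 1 - n ≤ q.getD 0 0 ∧ q.getD 0 0 ≤ n ∧
       1 - n ≤ q.getD 1 0 ∧ q.getD 1 0 ≤ n) :
    areConnected n threshold queries = areConnected_alt n threshold queries := by
  simp only [areConnected, areConnected_alt]
  set N := n.toNat with hN
  have hRel0 : pvRel N (PySem.List.pyRange 0 n 1, PySem.List.pyRepeat [(1 : Int)] n,
      PySem.List.pyRepeat [(0 : Int)] (n+1))
      (PySem.List.pyRange 0 n 1, PySem.List.pyRepeat [(0 : Int)] (n+1)) :=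
    ⟨rfl, pvGoodInit n⟩
  have hRelSt : pvRel N
      ((PySem.List.pyRange (threshold+1) (n+1) 1).foldl
        (fun (st : List Int × List Int × List Int) i =>
          if (PySem.List.pyGet? st.2.2 i).getD 0 = 0 then
            (PySem.List.pyRange 2 (PySem.Int.floordiv n i + 1) 1).foldl
              (fun (st2 : List Int × List Int × List Int) k =>
                ((unite st2.1 st2.2.1 (i-1) (i*k-1)).1, (unite st2.1 st2.2.1 (i-1) (i*k-1)).2,
                  PySem.List.pySetD st2.2.2 (i*k) 1)) st
          else st)
        (PySem.List.pyRange 0 n 1, PySem.List.pyRepeat [(1 : Int)] n,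
         PySem.List.pyRepeat [(0 : Int)] (n+1)))
      ((PySem.List.pyRange (threshold+1) (n+1) 1).foldl
        (fun (st : List Int × List Int) i =>
          if (PySem.List.pyGet? st.2 i).getD 0 = 0 then
            (PySem.List.pyRange 2 (PySem.Int.floordiv n i + 1) 1).foldl
              (fun (st2 : List Int × List Int) k =>
                ((if (PySem.List.pyGet? st2.1 (i-1)).getD 0 ≠ (PySem.List.pyGet? st2.1 (i*k-1)).getD 0
                    then st2.1.map (fun v => if v = (PySem.List.pyGet? st2.1 (i*k-1)).getD 0
                        then (PySem.List.pyGet? st2.1 (i-1)).getD 0 else v)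
                    else st2.1),
                 PySem.List.pySetD st2.2 (i*k) 1)) st
          else st)
        (PySem.List.pyRange 0 n 1, PySem.List.pyRepeat [(0 : Int)] (n+1))) := by
    by_cases hcase : n ≤ threshold
    · rw [show PySem.List.pyRange (threshold+1) (n+1) 1 = [] from
          PySem.List.pyRange_one_eq_nil (by omega)]
      simp only [List.foldl_nil]
      exact hRel0
    · have hthr : 0 ≤ threshold := by
        rcases hPre1 with h | h
        · exact h
        · omega
      apply pvFoldRel (pvRel N) _ _ _ _ _ hRel0
      intro i hi st t hR
      obtain ⟨h1, h2⟩ := PySem.List.mem_pyRange_one.mp hi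
      have hi1 : 1 ≤ i := by omega
      have hin : i ≤ n := by omega
      rw [hR.1]
      by_cases hcond : (PySem.List.pyGet? t.2 i).getD 0 = 0
      · rw [if_pos hcond, if_pos hcond]
        apply pvFoldRel (pvRel N) _ _ _ _ _ hR
        intro k hk st2 t2 hR2
        obtain ⟨hk1, hk2⟩ := PySem.List.mem_pyRange_one.mp hk
        have hkfd : k ≤ PySem.Int.floordiv n i := by omega
        have hik : i * k ≤ n := by
          have h2 := (PySem.Int.le_floordiv_iff_mul_le (by omega : (0:Int) < i)).mp hkfd
          calc i * k = k * i := mul_comm i k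
            _ ≤ n := h2
        exact pvInnerStep n N hN i k hi1 hk1 hik st2 t2 hR2
      · rw [if_neg hcond, if_neg hcond]
        exact hR
  obtain ⟨hV, hG⟩ := hRelSt
  rw [pvQueryFold n N hN _ hG.2.1 queries _ [] hG hPre2]
  simp

-- ===== VERDICT (by name: the statement is the Claim_ definition above) =====
theorem areConnected_spec : Claim_equal_areConnected := by
  intro n threshold queries hDom hPre
  unfold Spec_areConnected
  exact pvMain n threshold queries hPre.1 hPre.2
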